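-- pv_equiv track=rewrite | github.com/courtois-neuromod/shinobi_behav | src/features/features.py | fix_position_resets
-- ===== SOURCE A (Python) =====
-- def fix_position_resets(X_player_lists):
--     '''
--     Sometimes X_player resets to a previous value, but it's truly a new position.
--     This fixes it and makes sure that X_player is continuous
--
--     X_player_lists : A list of X_player arrays (one for each repetition)
--
--     fixed_X_player_lists : same as X_player_lists
--     '''
--     fixed_X_player_lists = []
--     for X_player in X_player_lists:
--         fixed_X_player_list = []
--         fix = 0
--         for i in range(1, len(X_player)-1):
--             if X_player[i-1] - X_player[i] > 100:
--                 fix += X_player[i-1] - X_player[i]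
--             fixed_X_player_list.append(X_player[i] + fix)
--         fixed_X_player_list = fixed_X_player_list
--         if fixed_X_player_list == []:
--             fixed_X_player_list.append(32) # in case the list becomes empty add 32 so it is removed
--         fixed_X_player_lists.append(fixed_X_player_list)
--     return fixed_X_player_lists
-- ===== SOURCE B (Python) =====
-- def _prefix_sums(deltas):
--     total = 0
--     out = []
--     for d in deltas:
--         total += d
--         out.append(total)
--     return out
--
--
-- def _fix_one(X):
--     core = X[1:-1]
--     deltas = [p - c if p - c > 100 else 0 for p, c in zip(X[:-2], core)]
--     offsets = _prefix_sums(deltas)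
--     rep = [c + o for c, o in zip(core, offsets)]
--     return rep if rep else [32]
--
--
-- def fix_position_resets(X_player_lists):
--     return [_fix_one(X) for X in X_player_lists]
-- ===== Notes on version B (the rewrite author's own statement) =====
-- stated objective: alternative
-- what changed: Replaces the fused stateful loop (mutable running 'fix' updated and read in one pass) by a three-stage pipeline over raw values: a zip of X[:-2] with X[1:-1] yielding per-step reset deltas, a prefix-sum pass turning them into cumulative offsets, and an elementwise add onto X[1:-1].
import Mathlib
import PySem

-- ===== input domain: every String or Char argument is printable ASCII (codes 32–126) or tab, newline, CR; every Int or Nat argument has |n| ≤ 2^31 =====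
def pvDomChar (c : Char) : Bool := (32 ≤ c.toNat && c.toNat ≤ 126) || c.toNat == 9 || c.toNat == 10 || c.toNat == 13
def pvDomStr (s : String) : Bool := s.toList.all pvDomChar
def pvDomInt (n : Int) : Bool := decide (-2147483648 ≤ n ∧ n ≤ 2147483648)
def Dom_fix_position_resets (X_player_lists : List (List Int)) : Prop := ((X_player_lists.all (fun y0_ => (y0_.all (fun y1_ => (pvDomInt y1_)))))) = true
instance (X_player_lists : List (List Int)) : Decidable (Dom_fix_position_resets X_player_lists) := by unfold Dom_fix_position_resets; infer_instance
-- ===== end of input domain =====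

-- B replaces A's single stateful loop by a delta / prefix-sum / elementwise-add pipeline
-- over the raw values (objective: alternative decomposition, same cost). Return values only.

-- ===== PORT A =====

-- body of 'for i in range(1, len(X_player)-1)': state is (fix, fixed_X_player_list)
def pvStepA (X : List Int) (s : Int × List Int) (i : Int) : Int × List Int :=
  let fix := if PySem.List.pyGetD X (i - 1) 0 - PySem.List.pyGetD X i 0 > 100
             then s.1 + (PySem.List.pyGetD X (i - 1) 0 - PySem.List.pyGetD X i 0)
             else s.1
  (fix, s.2 ++ [PySem.List.pyGetD X i 0 + fix])

def pvFixOneA (X : List Int) : List Int :=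
  let st := (PySem.List.pyRange 1 ((X.length : Int) - 1)).foldl (pvStepA X) (0, [])
  if st.2 = [] then st.2 ++ [32] else st.2

def fix_position_resets (X_player_lists : List (List Int)) : List (List Int) :=
  X_player_lists.foldl (fun acc X => acc ++ [pvFixOneA X]) []

-- ===== PORT B =====

-- per-step reset deltas from the raw values: zip(X[:-2], X[1:-1])
def pvDeltas (prevs core : List Int) : List Int :=
  List.zipWith (fun p c => if p - c > 100 then p - c else 0) prevs core

-- running total over the deltas (Source B's _prefix_sums)
def pvPrefixSums (total : Int) : List Int → List Int
  | [] => []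
  | d :: ds => (total + d) :: pvPrefixSums (total + d) ds

def pvFixOne (X : List Int) : List Int :=
  let core := PySem.List.slice X (some 1) (some (-1))
  let rep := List.zipWith (· + ·) core
    (pvPrefixSums 0 (pvDeltas (PySem.List.slice X none (some (-2))) core))
  if rep = [] then [32] else rep

def fix_position_resets_alt (X_player_lists : List (List Int)) : List (List Int) :=
  X_player_lists.map pvFixOne

-- ===== PRECONDITION & SPEC =====
def Spec_fix_position_resets (X_player_lists : List (List Int)) (out : List (List Int)) : Prop := out = fix_position_resets_alt X_player_lists
instance (X_player_lists : List (List Int)) (out : List (List Int)) : Decidable (Spec_fix_position_resets X_player_lists out) := by unfold Spec_fix_position_resets; infer_instance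

-- ===== CLAIM (what is proved, stated in full; the proofs are below) =====
def Claim_equal_fix_position_resets : Prop := ∀ (X_player_lists : List (List Int)), Dom_fix_position_resets X_player_lists → Spec_fix_position_resets X_player_lists (fix_position_resets X_player_lists)

-- ===== LEMMAS AND PROOFS =====

-- reference recursion: what both per-repetition computations produce on the core slice
def pvGo : Int → Int → List Int → List Int
  | _, _, [] => []
  | prev, fix, c :: cs =>
    let f := if prev - c > 100 then fix + (prev - c) else fix
    (c + f) :: pvGo c f cs

theorem pvZwTakeLeft (f : Int → Int → Int) :
    ∀ (ys xs : List Int) (m : Nat), ys.length ≤ m →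
      List.zipWith f (xs.take m) ys = List.zipWith f xs ys := by
  intro ys
  induction ys with
  | nil => intro xs m _; simp
  | cons y ys ih =>
    intro xs m hm
    cases xs with
    | nil => simp
    | cons x xs =>
      cases m with
      | zero => simp at hm
      | succ m =>
        simp only [List.take_succ_cons, List.zipWith_cons_cons]
        rw [ih xs m (by simpa using hm)]

theorem pvBgo : ∀ (cs : List Int) (prev fix : Int),
    List.zipWith (· + ·) cs (pvPrefixSums fix (pvDeltas (prev :: cs) cs)) = pvGo prev fix cs := by
  intro cs
  induction cs with
  | nil => intro prev fix; simp [pvDeltas, pvPrefixSums, pvGo]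
  | cons c cs ih =>
    intro prev fix
    simp only [pvDeltas, List.zipWith_cons_cons, pvPrefixSums, pvGo]
    split_ifs with h
    · rw [← ih]; simp [pvDeltas]
    · rw [← ih]; simp [pvDeltas]

theorem pvAloop (X : List Int) : ∀ (k : Nat) (a fix : Int) (acc : List Int),
    1 ≤ a → a + k = (X.length : Int) - 1 →
    ((PySem.List.pyRange a ((X.length : Int) - 1)).foldl (pvStepA X) (fix, acc)).2
      = acc ++ pvGo (X.getD (a - 1).toNat 0) fix ((X.drop a.toNat).take k) := by
  intro k
  induction k with
  | zero =>
    intro a fix acc ha hk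
    rw [PySem.List.pyRange_one_eq_nil (by omega)]
    simp [pvGo]
  | succ k ih =>
    intro a fix acc ha hk
    have hlen : a.toNat < X.length := by omega
    have hprev : (a - 1).toNat < X.length := by omega
    rw [PySem.List.pyRange_one_cons (by omega)]
    rw [List.foldl_cons]
    have hstep : pvStepA X (fix, acc) a =
        ((if X[(a-1).toNat] - X[a.toNat] > 100 then fix + (X[(a-1).toNat] - X[a.toNat]) else fix),
          acc ++ [X[a.toNat] + (if X[(a-1).toNat] - X[a.toNat] > 100 then fix + (X[(a-1).toNat] - X[a.toNat]) else fix)]) := by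
      simp only [pvStepA]
      rw [PySem.List.pyGetD_eq_getElem X 0 (by omega) (by omega),
          PySem.List.pyGetD_eq_getElem X 0 (by omega) (by omega)]
    rw [hstep]
    rw [ih (a + 1) _ _ (by omega) (by omega)]
    have hdrop : (X.drop a.toNat).take (k + 1)
        = X[a.toNat] :: ((X.drop (a + 1).toNat).take k) := by
      rw [← List.getElem_cons_drop hlen]
      have : (a + 1).toNat = a.toNat + 1 := by omega
      rw [this, List.take_succ_cons]
    rw [hdrop]
    have ha1 : (a + 1 - 1).toNat = a.toNat := by omega
    rw [ha1]
    have hgd1 : X.getD a.toNat 0 = X[a.toNat] := List.getD_eq_getElem X 0 hlen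
    have hgd2 : X.getD (a - 1).toNat 0 = X[(a-1).toNat] := List.getD_eq_getElem X 0 hprev
    rw [hgd1, hgd2]
    simp [pvGo, List.append_assoc]

theorem pvOne (X : List Int) : pvFixOneA X = pvFixOne X := by
  match X with
  | [] => rfl
  | [x] =>
    simp [pvFixOneA, pvFixOne, PySem.List.pyRange_one_eq_nil, PySem.List.slice,
      PySem.List.clampIdx, pvDeltas]
  | x :: y :: t =>
    have hlen : (x :: y :: t).length = t.length + 2 := by simp
    -- core slice X[1:-1] = (y::t).take t.length
    have hcore : PySem.List.slice (x :: y :: t) (some 1) (some (-1))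
        = (y :: t).take t.length := by
      simp only [PySem.List.slice, PySem.List.clampIdx]
      split_ifs <;> simp <;> omega
    have hcl : ((y :: t).take t.length).length ≤ t.length := by
      simp
    -- prevs slice X[:-2] = X.take t.length
    have hprevs : PySem.List.slice (x :: y :: t) none (some (-2))
        = (x :: y :: t).take t.length := by
      have := PySem.List.slice_to_neg_ofNat (x :: y :: t) 2 (by omega)
      simpa [hlen] using this
    -- A's loop result
    have hA : ((PySem.List.pyRange 1 (((x :: y :: t).length : Int) - 1)).foldl
        (pvStepA (x :: y :: t)) (0, [])).2
        = pvGo x 0 ((y :: t).take t.length) := by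
      have := pvAloop (x :: y :: t) t.length 1 0 [] (by omega) (by simp; omega)
      simpa using this
    -- B's deltas: both prevs and (x :: core) truncate to X itself
    have hd1 : pvDeltas ((x :: y :: t).take t.length) ((y :: t).take t.length)
        = pvDeltas (x :: y :: t) ((y :: t).take t.length) :=
      pvZwTakeLeft _ _ _ _ hcl
    have hd2 : pvDeltas (x :: ((y :: t).take t.length)) ((y :: t).take t.length)
        = pvDeltas (x :: y :: t) ((y :: t).take t.length) := by
      have h := pvZwTakeLeft (fun p c => if p - c > 100 then p - c else 0)
        ((y :: t).take t.length) (x :: y :: t) (t.length + 1) (by simp)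
      simpa [pvDeltas, List.take_succ_cons] using h
    have hB : List.zipWith (· + ·) ((y :: t).take t.length)
        (pvPrefixSums 0 (pvDeltas ((x :: y :: t).take t.length) ((y :: t).take t.length)))
        = pvGo x 0 ((y :: t).take t.length) := by
      rw [hd1, ← hd2, pvBgo]
    simp only [pvFixOneA, pvFixOne, hcore, hprevs, hA, hB]
    split_ifs with h <;> simp [h]

-- ===== VERDICT (by name: the statement is the Claim_ definition above) =====
theorem fix_position_resets_spec : Claim_equal_fix_position_resets := by
  intro L _
  unfold Spec_fix_position_resets fix_position_resets fix_position_resets_alt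
  rw [PySem.List.foldl_append_singleton_eq_map pvFixOneA L []]
  simp [List.map_congr_left (fun X _ => pvOne X)]
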